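-- pv_equiv track=rewrite | github.com/jschug1/Arxiv-Metadata | model.py | generate_list_labels
-- ===== SOURCE A (Python) =====
-- import copy
--
-- def generate_subsets(temp_list):
--     if not temp_list:
--         return []
--
--     if len(temp_list) == 1:
--         return [[], temp_list]
--
--     list1 = generate_subsets(temp_list[1:])
--     list2 = copy.deepcopy(list1)
--     for i in range(len(list1)):
--         list2[i].insert(0, temp_list[0])
--
--     subset_list = list1 + list2
--
--     return subset_list
--
-- def generate_list_labels(cat_dict, cross):
--     max_val = max(cat_dict.values())
--
--     ints_list = list(range(max_val + 1))
--     label_lists = generate_subsets(ints_list)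
--
--     label_lists[0].append(max_val + 1)
--
--     for ind in range(len(label_lists)):
--         label_lists[ind] = [tuple(label_lists[ind]), ind]
--
--     label_dict = {tup: ind for [tup, ind] in label_lists}
--
--     if cross:
--         return label_dict
--
--     else:
--         len_one_keys = []
--         for key in label_dict.keys():
--             if len(key) == 1:
--                 len_one_keys.append(key)
--         exclusive_label_dict = {key: key[0] for key in len_one_keys}
--         return exclusive_label_dict
-- ===== SOURCE B (Python) =====
-- def generate_list_labels(cat_dict, cross):
--     max_val = max(cat_dict.values())
--     if not cross:
--         # only the singleton keys survive: (max_val+1,) first, then (max_val,), ..., (0,)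
--         return {(i,): i for i in range(max_val + 1, -1, -1)}
--     n = max_val + 1
--     out = {}
--     for ind in range(2 ** n):
--         if ind == 0:
--             key = (max_val + 1,)
--         else:
--             key = tuple(i for i in range(n) if (ind // 2 ** (n - 1 - i)) % 2 == 1)
--         out[key] = ind
--     return out
-- ===== Notes on version B (the rewrite author's own statement) =====
-- stated objective: faster
-- what changed: B drops A's recursive deepcopy-based power-set construction: for cross=False it emits the surviving singleton keys directly from range(max_val+1, -1, -1), and for cross=True it enumerates each subset key directly from the bits of its index instead of recursively doubling lists.
import Mathlib
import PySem

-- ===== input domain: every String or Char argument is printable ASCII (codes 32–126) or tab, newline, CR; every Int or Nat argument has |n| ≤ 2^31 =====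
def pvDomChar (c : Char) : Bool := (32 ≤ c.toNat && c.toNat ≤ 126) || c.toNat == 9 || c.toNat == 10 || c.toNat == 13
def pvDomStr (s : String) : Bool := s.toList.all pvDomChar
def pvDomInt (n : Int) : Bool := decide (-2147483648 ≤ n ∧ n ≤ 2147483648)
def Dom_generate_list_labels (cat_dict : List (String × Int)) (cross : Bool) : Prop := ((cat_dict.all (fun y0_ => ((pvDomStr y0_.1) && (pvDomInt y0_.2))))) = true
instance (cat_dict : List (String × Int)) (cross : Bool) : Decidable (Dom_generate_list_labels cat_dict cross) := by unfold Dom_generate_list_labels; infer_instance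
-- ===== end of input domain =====

-- B replaces A's recursive power-set construction by direct bit-arithmetic enumeration of the
-- subset keys; for cross=False it emits the surviving singleton keys straight from a countdown
-- range, never building the power set.

-- ===== PORT A =====
-- A's recursive power-set builder; 'copy.deepcopy' + 'list.insert(0, x)' is 'cons' in a pure setting
def generate_subsets : List Int → List (List Int)
  | [] => []
  | [x] => [[], [x]]
  | x :: y :: rest =>
    let list1 := generate_subsets (y :: rest)
    let list2 := list1.map (fun s => x :: s)
    list1 ++ list2

def generate_list_labels (cat_dict : List (String × Int)) (cross : Bool) : List (List Int × Int) :=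
  match PySem.List.max? (cat_dict.map (fun p => p.2)) (fun v => v) with
  | none => []       -- max() of an empty dict raises ValueError; excluded by Pre_
  | some max_val =>
    let ints_list := PySem.List.pyRange 0 (max_val + 1) 1
    match generate_subsets ints_list with
    | [] => []       -- 'label_lists[0]' raises IndexError (happens iff max_val < 0); excluded by Pre_
    | first :: rest =>
      let label_lists := (first ++ [max_val + 1]) :: rest
      -- 'for ind in range(len(...)): label_lists[ind] = [tuple(...), ind]' then '{tup: ind for ...}'
      let label_dict := (PySem.List.enumerate label_lists).foldl
        (fun d p => d.insert p.2 p.1) PySem.Dict.empty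
      if cross then label_dict.items
      else
        let len_one_keys := label_dict.keys.filter (fun k => k.length == 1)
        -- 'key[0]' is total here: every k in len_one_keys has length 1
        (len_one_keys.foldl (fun d k => d.insert k (k.headD 0)) PySem.Dict.empty).items

-- ===== PORT B =====
def generate_list_labels_alt (cat_dict : List (String × Int)) (cross : Bool) : List (List Int × Int) :=
  match PySem.List.max? (cat_dict.map (fun p => p.2)) (fun v => v) with
  | none => []       -- max() of an empty dict raises ValueError, as in A
  | some max_val =>
    if !cross then
      ((PySem.List.pyRange (max_val + 1) (-1) (-1)).foldl
        (fun d i => d.insert [i] i) PySem.Dict.empty).items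
    else
      let n := max_val + 1
      -- '2 ** n' / '2 ** (n - 1 - i)': exponents are ≥ 0 on every admitted input (.toNat is exact there)
      ((PySem.List.pyRange 0 ((2:Int) ^ n.toNat) 1).foldl
        (fun d ind =>
          let key := if ind == 0 then [max_val + 1]
            else (PySem.List.pyRange 0 n 1).filter
              (fun i => PySem.Int.mod (PySem.Int.floordiv ind ((2:Int) ^ ((n - 1 - i).toNat))) 2 == 1)
          d.insert key ind)
        PySem.Dict.empty).items

-- ===== PRECONDITION & SPEC =====
-- A raises ValueError on an empty dict and IndexError when all values are negative; Pre_ excludes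
-- exactly those inputs.
def Pre_generate_list_labels (cat_dict : List (String × Int)) (cross : Bool) : Prop :=
  cat_dict ≠ [] ∧ ∃ p ∈ cat_dict, 0 ≤ p.2
instance (cat_dict : List (String × Int)) (cross : Bool) : Decidable (Pre_generate_list_labels cat_dict cross) := by unfold Pre_generate_list_labels; infer_instance

def pvWitness_generate_list_labels : (List (String × Int)) × Bool := ([("a", 1)], true)

def Spec_generate_list_labels (cat_dict : List (String × Int)) (cross : Bool) (out : List (List Int × Int)) : Prop := out = generate_list_labels_alt cat_dict cross
instance (cat_dict : List (String × Int)) (cross : Bool) (out : List (List Int × Int)) : Decidable (Spec_generate_list_labels cat_dict cross out) := by unfold Spec_generate_list_labels; infer_instance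

-- ===== CLAIM (what is proved, stated in full; the proofs are below) =====
def Claim_equal_generate_list_labels : Prop := ∀ (cat_dict : List (String × Int)) (cross : Bool), Dom_generate_list_labels cat_dict cross → Pre_generate_list_labels cat_dict cross → Spec_generate_list_labels cat_dict cross (generate_list_labels cat_dict cross)

-- ===== LEMMAS AND PROOFS =====

-- the subset of l selected by the bits of j, MSB = head of l
def subBits : List Int → Nat → List Int
  | [], _ => []
  | x :: t, j => (if j.testBit t.length then [x] else []) ++ subBits t j

theorem subBits_zero (l : List Int) : subBits l 0 = [] := by
  induction l with
  | nil => rfl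
  | cons x t ih => simp [subBits, ih]

theorem mem_subBits {y : Int} {l : List Int} {j : Nat} (h : y ∈ subBits l j) : y ∈ l := by
  induction l with
  | nil => simp [subBits] at h
  | cons x t ih =>
    simp only [subBits, List.mem_append] at h
    rcases h with h | h
    · split at h
      · simp at h; simp [h]
      · simp at h
    · simp [ih h]

theorem subBits_shift : ∀ (l : List Int) (k j : Nat), l.length ≤ k →
    subBits l (2^k + j) = subBits l j
  | [], _, _, _ => rfl
  | x :: t, k, j, h => by
    have h1 : t.length < k := by simp only [List.length_cons] at h; omega
    rw [subBits, subBits, Nat.testBit_two_pow_add_gt h1,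
      subBits_shift t k j (by omega)]

theorem subBits_low (x : Int) (t : List Int) (j : Nat) (h : j < 2^t.length) :
    subBits (x :: t) j = subBits t j := by
  simp [subBits, Nat.testBit_lt_two_pow h]

theorem subBits_high (x : Int) (t : List Int) (j : Nat) (h : j < 2^t.length) :
    subBits (x :: t) (2^t.length + j) = x :: subBits t j := by
  have hb : (2^t.length + j).testBit t.length = true := by
    rw [Nat.testBit_two_pow_add_eq, Nat.testBit_lt_two_pow h]; rfl
  simp [subBits, hb, subBits_shift t t.length j le_rfl]

theorem subBits_eq_nil_iff : ∀ (l : List Int) (j : Nat), j < 2^l.length →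
    (subBits l j = [] ↔ j = 0)
  | [], j, h => by
    simp only [List.length_nil, pow_zero] at h
    simp [subBits]; omega
  | x :: t, j, h => by
    rw [show (x :: t).length = t.length + 1 from rfl, pow_succ, Nat.mul_two] at h
    by_cases hj : j < 2^t.length
    · rw [subBits_low x t j hj]
      exact subBits_eq_nil_iff t j hj
    · have e : j = 2^t.length + (j - 2^t.length) := by omega
      rw [e, subBits_high x t _ (by omega)]
      constructor
      · intro hc; cases hc
      · intro hc; omega

theorem subBits_inj : ∀ (l : List Int), l.Nodup → ∀ j1 j2 : Nat,
    j1 < 2^l.length → j2 < 2^l.length → subBits l j1 = subBits l j2 → j1 = j2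
  | [], _, j1, j2, h1, h2, _ => by
    simp only [List.length_nil, pow_zero] at h1 h2; omega
  | x :: t, hnd, j1, j2, h1, h2, heq => by
    rw [List.nodup_cons] at hnd
    obtain ⟨hx, ht⟩ := hnd
    rw [show (x :: t).length = t.length + 1 from rfl, pow_succ, Nat.mul_two] at h1 h2
    by_cases c1 : j1 < 2^t.length <;> by_cases c2 : j2 < 2^t.length
    · rw [subBits_low x t j1 c1, subBits_low x t j2 c2] at heq
      exact subBits_inj t ht j1 j2 c1 c2 heq
    · exfalso
      have e2 : j2 = 2^t.length + (j2 - 2^t.length) := by omega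
      rw [subBits_low x t j1 c1, e2, subBits_high x t _ (by omega)] at heq
      exact hx (mem_subBits (heq ▸ List.mem_cons_self))
    · exfalso
      have e1 : j1 = 2^t.length + (j1 - 2^t.length) := by omega
      rw [subBits_low x t j2 c2, e1, subBits_high x t _ (by omega)] at heq
      exact hx (mem_subBits (heq ▸ List.mem_cons_self))
    · have e1 : j1 = 2^t.length + (j1 - 2^t.length) := by omega
      have e2 : j2 = 2^t.length + (j2 - 2^t.length) := by omega
      rw [e1, e2, subBits_high x t _ (by omega), subBits_high x t _ (by omega)] at heq
      have := subBits_inj t ht _ _ (by omega) (by omega) (List.tail_eq_of_cons_eq heq)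
      omega

theorem generate_subsets_eq : ∀ (l : List Int), l ≠ [] →
    generate_subsets l = (List.range (2^l.length)).map (subBits l)
  | [], h => absurd rfl h
  | [x], _ => by
    have h1 : subBits [x] 1 = [x] := by simp [subBits]
    have h0 : subBits [x] 0 = [] := subBits_zero _
    simp [generate_subsets, show List.range 2 = [0, 1] from rfl, h0, h1]
  | x :: y :: t, _ => by
    have IH := generate_subsets_eq (y :: t) (by simp)
    show generate_subsets (y :: t) ++ (generate_subsets (y :: t)).map (fun s => x :: s)
      = (List.range (2^(x :: y :: t).length)).map (subBits (x :: y :: t))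
    rw [show (x :: y :: t).length = (y :: t).length + 1 from rfl, pow_succ, Nat.mul_two,
      List.range_add, List.map_append, List.map_map, IH]
    congr 1
    · apply List.map_congr_left
      intro j hj
      exact (subBits_low x (y :: t) j (List.mem_range.1 hj)).symm
    · rw [List.map_map]
      apply List.map_congr_left
      intro j hj
      exact (subBits_high x (y :: t) j (List.mem_range.1 hj)).symm

theorem range_filter_zero (K : Nat) (h : 0 < K) :
    (List.range K).filter (fun j => j == 0) = [0] := by
  obtain ⟨K', rfl⟩ : ∃ K', K = K' + 1 := ⟨K - 1, by omega⟩
  rw [List.range_succ_eq_map]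
  simp [List.filter_map, Function.comp_def]

theorem filter_len_one : ∀ (l : List Int),
    ((List.range (2^l.length)).map (subBits l)).filter (fun s => s.length == 1)
      = l.reverse.map (fun z => [z])
  | [] => by simp [subBits]
  | x :: t => by
    have IH := filter_len_one t
    rw [show (x :: t).length = t.length + 1 from rfl, pow_succ, Nat.mul_two,
      List.range_add, List.map_append, List.filter_append]
    have half1 : ((List.range (2^t.length)).map (subBits (x :: t))).filter
        (fun s => s.length == 1) = t.reverse.map (fun z => [z]) := by
      rw [List.map_congr_left (fun j hj => subBits_low x t j (List.mem_range.1 hj))]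
      exact IH
    have half2 : (((List.range (2^t.length)).map (fun j => 2^t.length + j)).map
        (subBits (x :: t))).filter (fun s => s.length == 1) = [[x]] := by
      rw [List.map_map]
      have hmc : (List.range (2^t.length)).map (subBits (x :: t) ∘ fun j => 2^t.length + j)
          = (List.range (2^t.length)).map (fun j => x :: subBits t j) :=
        List.map_congr_left (fun j hj => subBits_high x t j (List.mem_range.1 hj))
      rw [hmc, List.filter_map]
      have hfc : ∀ j ∈ List.range (2^t.length),
          ((fun s : List Int => s.length == 1) ∘ (fun j => x :: subBits t j)) j = (j == 0) := by
        intro j hj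
        by_cases hz : j = 0
        · simp [hz, subBits_zero]
        · have hne : subBits t j ≠ [] := by
            intro hc
            exact hz ((subBits_eq_nil_iff t j (List.mem_range.1 hj)).1 hc)
          have hpos : 0 < (subBits t j).length := List.length_pos_iff.2 hne
          simp only [Function.comp_apply, List.length_cons]
          rw [show ((subBits t j).length + 1 == 1) = false from by
            rw [beq_eq_false_iff_ne]; omega]
          rw [show (j == 0) = false from by rw [beq_eq_false_iff_ne]; exact hz]
      rw [List.filter_congr hfc, range_filter_zero _ (Nat.two_pow_pos _)]
      simp [subBits_zero]
    rw [half1, half2, List.reverse_cons, List.map_append]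
    simp

theorem enumerate_map_range (f : Nat → List Int) : ∀ (K : Nat) (s : Int),
    PySem.List.enumerate ((List.range K).map f) s
      = (List.range K).map (fun (j : Nat) => ((s + j : Int), f j)) := by
  intro K
  induction K with
  | zero => intro s; simp [PySem.List.enumerate_nil]
  | succ K ih =>
    intro s
    rw [List.range_succ, List.map_append, PySem.List.enumerate_append, ih s]
    simp [PySem.List.enumerate_cons, PySem.List.enumerate_nil]

theorem subBits_eq_filter (j : Nat) (a b : Int) :
    subBits (PySem.List.pyRange a b 1) j
      = (PySem.List.pyRange a b 1).filter
          (fun i => PySem.Int.mod (PySem.Int.floordiv (j : Int) ((2:Int) ^ ((b - 1 - i).toNat))) 2 == 1) := by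
  generalize hk : (b - a).toNat = k
  induction k generalizing a with
  | zero =>
    rw [PySem.List.pyRange_one_eq_nil (by omega)]
    rfl
  | succ k ih =>
    have hab : a < b := by omega
    rw [PySem.List.pyRange_one_cons hab, List.filter_cons, subBits, ih (a + 1) (by omega)]
    have hlen : (PySem.List.pyRange (a + 1) b 1).length = (b - 1 - a).toNat := by
      rw [PySem.List.length_pyRange_one]
      congr 1
      ring
    have hpred : (PySem.Int.mod (PySem.Int.floordiv (j : Int) ((2:Int) ^ ((b - 1 - a).toNat))) 2 == 1)
        = j.testBit ((b - 1 - a).toNat) := by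
      set e := (b - 1 - a).toNat
      have h2 : ((2:Int) ^ e) = ((2^e : Nat) : Int) := by push_cast; ring
      have h2' : (2:Int) = ((2 : Nat) : Int) := by norm_num
      rw [h2, PySem.Int.floordiv_natCast, h2', PySem.Int.mod_natCast,
        Nat.testBit_eq_decide_div_mod_eq]
      by_cases hbit : j / 2^e % 2 = 1
      · simp [hbit]
      · have h0 : j / 2^e % 2 = 0 := by omega
        simp [h0]
    rw [hlen, hpred]
    split <;> simp

theorem main_eq (cat_dict : List (String × Int)) (cross : Bool)
    (h1 : cat_dict ≠ []) (h2 : ∃ p ∈ cat_dict, 0 ≤ p.2) :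
    generate_list_labels cat_dict cross = generate_list_labels_alt cat_dict cross := by
  obtain ⟨p0, hp0, hp0n⟩ := h2
  cases hmax : PySem.List.max? (cat_dict.map (fun p => p.2)) (fun v => v) with
  | none =>
    exact absurd (List.map_eq_nil_iff.1 ((PySem.List.max?_eq_none_iff _ _).1 hmax)) h1
  | some m =>
    have hm : 0 ≤ m := le_trans hp0n
      (PySem.List.max?_isMax hmax p0.2 (List.mem_map_of_mem hp0))
    unfold generate_list_labels generate_list_labels_alt
    rw [hmax]
    dsimp only
    have hN : (PySem.List.pyRange 0 (m + 1) 1).length = (m + 1).toNat := by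
      rw [PySem.List.length_pyRange_one]; congr 1; ring
    have hNpos : 0 < (PySem.List.pyRange 0 (m + 1) 1).length := by rw [hN]; omega
    have hlne : (PySem.List.pyRange 0 (m + 1) 1) ≠ [] := by
      intro hc; rw [hc] at hNpos; simp at hNpos
    have hS := generate_subsets_eq _ hlne
    obtain ⟨K', hK'⟩ : ∃ K', 2 ^ (PySem.List.pyRange 0 (m + 1) 1).length = K' + 1 :=
      ⟨2 ^ (PySem.List.pyRange 0 (m + 1) 1).length - 1,
        by have := Nat.two_pow_pos (PySem.List.pyRange 0 (m + 1) 1).length; omega⟩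
    rw [hK', List.range_succ_eq_map, List.map_cons, subBits_zero, List.map_map] at hS
    rw [hS]
    dsimp only
    have hlab : ([] ++ [m + 1]) ::
          ((List.range K').map (subBits (PySem.List.pyRange 0 (m + 1) 1) ∘ Nat.succ))
        = (List.range (K' + 1)).map
            (fun j => if j = 0 then [m + 1] else subBits (PySem.List.pyRange 0 (m + 1) 1) j) := by
      rw [List.range_succ_eq_map, List.map_cons, List.map_map, List.nil_append]
      congr 1
    rw [hlab, enumerate_map_range, List.foldl_map]
    dsimp only
    simp only [zero_add]
    cases cross with
    | true =>
      rw [if_pos (rfl : true = true), if_neg (by simp : ¬((!true) = true))]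
      congr 1
      have hrange : PySem.List.pyRange 0 ((2:Int) ^ (m + 1).toNat) 1
          = (List.range (K' + 1)).map (fun (k : Nat) => ((k : Int))) := by
        rw [PySem.List.pyRange_one]
        have h2 : ((2:Int) ^ (m + 1).toNat) = ((2 ^ (m + 1).toNat : Nat) : Int) := by
          push_cast; ring
        rw [show (((2:Int) ^ (m + 1).toNat) - 0).toNat = K' + 1 from by
          rw [h2, sub_zero, Int.toNat_natCast, ← hN, hK']]
        apply List.map_congr_left
        intro k _
        simp
      rw [hrange, List.foldl_map]
      apply PySem.List.foldl_congr_mem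
      intro acc j hj
      dsimp only
      congr 1
      by_cases hz : j = 0
      · subst hz; simp
      · have hb : ((j : Int) == 0) = false := by
          rw [beq_eq_false_iff_ne]; exact_mod_cast hz
        rw [if_neg hz, hb]
        simp only [Bool.false_eq_true, if_false]
        exact subBits_eq_filter j 0 (m + 1)
    | false =>
      rw [if_pos (by rfl : (!false) = true)]
      have hnodup : ((List.range (K' + 1)).map
          (fun j => if j = 0 then [m + 1] else subBits (PySem.List.pyRange 0 (m + 1) 1) j)).Nodup := by
        apply List.Nodup.map_on ?_ List.nodup_range
        intro j1 hj1 j2 hj2 heq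
        rw [List.mem_range] at hj1 hj2
        by_cases z1 : j1 = 0 <;> by_cases z2 : j2 = 0
        · omega
        · exfalso
          rw [if_pos z1, if_neg z2] at heq
          have hmem : (m + 1) ∈ subBits (PySem.List.pyRange 0 (m + 1) 1) j2 :=
            heq ▸ List.mem_cons_self
          have := (PySem.List.mem_pyRange_one).1 (mem_subBits hmem)
          omega
        · exfalso
          rw [if_neg z1, if_pos z2] at heq
          have hmem : (m + 1) ∈ subBits (PySem.List.pyRange 0 (m + 1) 1) j1 :=
            heq.symm ▸ List.mem_cons_self
          have := (PySem.List.mem_pyRange_one).1 (mem_subBits hmem)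
          omega
        · rw [if_neg z1, if_neg z2] at heq
          exact subBits_inj _ (PySem.List.nodup_pyRange_one 0 (m + 1)) j1 j2
            (by omega) (by omega) heq
      rw [PySem.Dict.keys_foldl_insert_key,
        show (PySem.Dict.empty : PySem.Dict (List Int) Int).keys = [] from rfl,
        PySem.Set.update_nil_left, PySem.Set.ofList_eq_self_of_nodup _ hnodup]
      have hfl : ((List.range (K' + 1)).map
            (fun j => if j = 0 then [m + 1] else subBits (PySem.List.pyRange 0 (m + 1) 1) j)).filter
            (fun k => k.length == 1)
          = ((m + 1) :: (PySem.List.pyRange 0 (m + 1) 1).reverse).map (fun z => [z]) := by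
        have base := filter_len_one (PySem.List.pyRange 0 (m + 1) 1)
        rw [hK', List.range_succ_eq_map, List.map_cons, subBits_zero, List.map_map,
          List.filter_cons] at base
        rw [if_neg (by decide : ¬((([] : List Int).length == 1) = true))] at base
        have htail : (List.range K').map
              ((fun j => if j = 0 then [m + 1] else subBits (PySem.List.pyRange 0 (m + 1) 1) j)
                ∘ Nat.succ)
            = (List.range K').map (subBits (PySem.List.pyRange 0 (m + 1) 1) ∘ Nat.succ) :=
          List.map_congr_left (fun j _ => by simp [Function.comp])
        rw [List.range_succ_eq_map, List.map_cons, List.map_map, List.filter_cons, htail,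
          if_pos (rfl : ((0 : Nat) = 0)), if_pos (by rfl : ((([m + 1] : List Int).length == 1) = true)),
          List.map_cons]
        rw [base]
      rw [hfl, List.foldl_map]
      have hBrange : PySem.List.pyRange (m + 1) (-1) (-1)
          = (m + 1) :: (PySem.List.pyRange 0 (m + 1) 1).reverse := by
        rw [PySem.List.pyRange_neg_one_cons (by omega : (-1:Int) < m + 1)]
        congr 1
        rw [show (m + 1 - 1 : Int) = m from by ring, PySem.List.pyRange_neg_one_eq_reverse]
        norm_num
      rw [hBrange]
      congr 1

-- ===== VERDICT (by name: the statement is the Claim_ definition above) =====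
theorem generate_list_labels_spec : Claim_equal_generate_list_labels := by
  intro cat_dict cross _ hpre
  unfold Spec_generate_list_labels
  exact main_eq cat_dict cross hpre.1 hpre.2
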